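-- pv_equiv track=rewrite | github.com/yeatonj/adventofcode2024 | day15/day15.py | check_pt2_lateral_move
-- ===== SOURCE A (Python) =====
-- def check_pt2_lateral_move(loc, map, dir):
--     if (map.get(loc) == '.'):
--         return True
--     elif (map.get(loc) == '#'):
--         return False
--     if (dir == '<'):
--         return check_pt2_lateral_move((loc[0], loc[1] - 1), map, dir)
--     else:
--         return check_pt2_lateral_move((loc[0], loc[1] + 1), map, dir)
-- ===== SOURCE B (Python) =====
-- def check_pt2_lateral_move(loc, map, dir):
--     row, col = loc
--     sign = -1 if dir == '<' else 1
--     best = None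
--     for (r, c), v in map.items():
--         d = (c - col) * sign
--         if r == row and d >= 0 and v in ('.', '#') and (best is None or d < best[0]):
--             best = (d, v)
--     return best[1] == '.'
-- ===== Notes on version B (the rewrite author's own statement) =====
-- stated objective: alternative
-- what changed: Instead of walking cell by cell until a gap or wall, B makes a single pass over the dict items and selects the nearest '.'/'#' cell in the scan direction, returning whether it is a gap.
import Mathlib
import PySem

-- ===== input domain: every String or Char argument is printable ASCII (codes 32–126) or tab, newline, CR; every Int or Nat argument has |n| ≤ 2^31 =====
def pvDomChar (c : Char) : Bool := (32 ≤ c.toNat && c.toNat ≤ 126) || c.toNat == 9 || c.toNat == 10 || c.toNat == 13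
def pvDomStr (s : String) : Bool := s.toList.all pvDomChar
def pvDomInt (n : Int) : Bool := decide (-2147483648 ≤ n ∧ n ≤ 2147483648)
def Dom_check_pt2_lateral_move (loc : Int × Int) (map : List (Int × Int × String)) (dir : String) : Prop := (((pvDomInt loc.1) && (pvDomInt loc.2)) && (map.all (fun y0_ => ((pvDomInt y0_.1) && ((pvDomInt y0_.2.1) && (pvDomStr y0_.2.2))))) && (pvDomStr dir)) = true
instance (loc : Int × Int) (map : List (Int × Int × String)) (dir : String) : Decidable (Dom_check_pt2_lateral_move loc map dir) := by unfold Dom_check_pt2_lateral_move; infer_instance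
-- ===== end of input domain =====

-- ===== PORT A =====
-- B replaces A's cell-by-cell recursive walk by a single pass over the dict items that
-- selects the nearest '.'/'#' cell in the scan direction (alternative algorithm, same value).

-- dict.get((r,c)) on the association list (first match), as A's Python calls it
def pyGetCell (map : List (Int × Int × String)) (loc : Int × Int) : Option String :=
  match map with
  | [] => none
  | (r, c, v) :: rest => if r = loc.1 && c = loc.2 then some v else pyGetCell rest loc

-- fuel making A's recursion total: 1 + the largest column distance from loc occurring in the
-- map; Pre_ guarantees a stop cell within that distance, so on admitted inputs the fuel is
-- never exhausted and the 0-fuel default is dead code (a totality guard, not a size bound)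
def fuelA (loc : Int × Int) (map : List (Int × Int × String)) : Nat :=
  1 + map.foldl (fun m e => max m (e.2.1 - loc.2).natAbs) 0

def goA (fuel : Nat) (loc : Int × Int) (map : List (Int × Int × String)) (dir : String) : Bool :=
  match fuel with
  | 0 => false
  | f + 1 =>
    if pyGetCell map loc = some "." then true
    else if pyGetCell map loc = some "#" then false
    else if dir = "<" then goA f (loc.1, loc.2 - 1) map dir
    else goA f (loc.1, loc.2 + 1) map dir

def check_pt2_lateral_move (loc : Int × Int) (map : List (Int × Int × String)) (dir : String) : Bool :=
  goA (fuelA loc map) loc map dir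

-- ===== PORT B =====
-- Source B's loop body: keep the candidate (distance, value) with the smallest distance ≥ 0
def stepB (row col sign : Int) (best : Option (Int × String)) (e : Int × Int × String) : Option (Int × String) :=
  let d := (e.2.1 - col) * sign
  if e.1 == row && decide (0 ≤ d) && (e.2.2 == "." || e.2.2 == "#") &&
      (match best with | none => true | some b => decide (d < b.1)) then
    some (d, e.2.2)
  else best

-- Source B's single pass over map.items()
def bestStop (map : List (Int × Int × String)) (row col sign : Int) : Option (Int × String) :=
  map.foldl (stepB row col sign) none

def check_pt2_lateral_move_alt (loc : Int × Int) (map : List (Int × Int × String)) (dir : String) : Bool :=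
  let sign : Int := if dir = "<" then -1 else 1
  match bestStop map loc.1 loc.2 sign with
  | some (_, v) => v == "."
  | none => false   -- Source B raises TypeError here (best[1] with best = None); outside Pre_

-- ===== PRECONDITION & SPEC =====
-- Pre_ excludes inputs with NO '.'/'#' cell in the scan direction, where Python A never stops
-- walking (it hits CPython's recursion limit with RecursionError and Source B raises TypeError),
-- and association lists with duplicate keys, which a Python dict — the actual type of the
-- map argument — cannot represent.
def Pre_check_pt2_lateral_move (loc : Int × Int) (map : List (Int × Int × String)) (dir : String) : Prop :=
  (map.map (fun e => (e.1, e.2.1))).Nodup ∧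
  ∃ e ∈ map, e.1 = loc.1 ∧ (e.2.2 = "." ∨ e.2.2 = "#") ∧
    0 ≤ (e.2.1 - loc.2) * (if dir = "<" then -1 else 1)
instance (loc : Int × Int) (map : List (Int × Int × String)) (dir : String) : Decidable (Pre_check_pt2_lateral_move loc map dir) := by
  unfold Pre_check_pt2_lateral_move; infer_instance

def pvWitness_check_pt2_lateral_move : (Int × Int) × (List (Int × Int × String)) × String :=
  ((0, 0), [(0, 2, "."), (0, 1, "O")], ">")

def Spec_check_pt2_lateral_move (loc : Int × Int) (map : List (Int × Int × String)) (dir : String) (out : Bool) : Prop := out = check_pt2_lateral_move_alt loc map dir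
instance (loc : Int × Int) (map : List (Int × Int × String)) (dir : String) (out : Bool) : Decidable (Spec_check_pt2_lateral_move loc map dir out) := by unfold Spec_check_pt2_lateral_move; infer_instance

-- ===== CLAIM (what is proved, stated in full; the proofs are below) =====
def Claim_equal_check_pt2_lateral_move : Prop := ∀ (loc : Int × Int) (map : List (Int × Int × String)) (dir : String), Dom_check_pt2_lateral_move loc map dir → Pre_check_pt2_lateral_move loc map dir → Spec_check_pt2_lateral_move loc map dir (check_pt2_lateral_move loc map dir)

-- ===== LEMMAS AND PROOFS =====

-- skipping a non-matching head of the association list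
theorem pyGetCell_cons_ne (r c : Int) (v : String) (rest : List (Int × Int × String))
    (row col : Int) (hne : ¬(r = row ∧ c = col)) :
    pyGetCell ((r, c, v) :: rest) (row, col) = pyGetCell rest (row, col) := by
  simp only [pyGetCell]
  rw [if_neg (by simpa using hne)]

-- distinct keys make the first-match lookup agree with membership
theorem pyGetCell_of_mem (map : List (Int × Int × String))
    (hnd : (map.map (fun e => (e.1, e.2.1))).Nodup)
    (e : Int × Int × String) (he : e ∈ map) :
    pyGetCell map (e.1, e.2.1) = some e.2.2 := by
  induction map with
  | nil => cases he
  | cons a rest ih =>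
    obtain ⟨r, c, v⟩ := a
    simp only [List.map_cons, List.nodup_cons] at hnd
    rcases List.mem_cons.mp he with rfl | hrest
    · simp [pyGetCell]
    · have hne : ¬(r = e.1 ∧ c = e.2.1) := by
        intro ⟨h1, h2⟩
        exact hnd.1 (by simpa [h1, h2] using List.mem_map_of_mem (f := fun e => (e.1, e.2.1)) hrest)
      rw [pyGetCell_cons_ne r c v rest e.1 e.2.1 hne]
      exact ih hnd.2 hrest

-- an element's column distance is within the fold-maximum that defines the fuel
theorem le_foldl_max (l : List (Int × Int × String)) (f : Int × Int × String → Nat) :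
    ∀ acc : Nat, (acc ≤ l.foldl (fun m e => max m (f e)) acc) ∧
      ∀ e ∈ l, f e ≤ l.foldl (fun m e => max m (f e)) acc := by
  induction l with
  | nil => intro acc; exact ⟨le_refl _, by intro e he; cases he⟩
  | cons a rest ih =>
    intro acc
    refine ⟨le_trans (le_max_left _ _) (ih (max acc (f a))).1, ?_⟩
    intro e he
    rcases List.mem_cons.mp he with rfl | hrest
    · exact le_trans (le_max_right _ _) (ih (max acc (f e))).1
    · exact (ih (max acc (f a))).2 e hrest

-- once the candidate at distance 0 is held, the fold never replaces it
theorem foldl_stepB_absorb (l : List (Int × Int × String)) (row col sign : Int) (v : String) :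
    l.foldl (stepB row col sign) (some (0, v)) = some (0, v) := by
  induction l with
  | nil => rfl
  | cons e rest ih =>
    have h : stepB row col sign (some (0, v)) e = some (0, v) := by
      simp only [stepB]
      split
      · rename_i h
        simp only [Bool.and_eq_true, decide_eq_true_eq] at h
        omega
      · rfl
    simpa [List.foldl_cons, h] using ih

-- the scrutinised cell is a stop: the fold returns it (distance 0 beats every candidate)
theorem foldl_stepB_hit (l : List (Int × Int × String)) (acc : Option (Int × String))
    (row col sign : Int) (v : String)
    (hs : sign = -1 ∨ sign = 1)
    (hstop : v = "." ∨ v = "#")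
    (hget : pyGetCell l (row, col) = some v)
    (hacc : acc = none ∨ ∃ p, acc = some p ∧ 0 < p.1) :
    l.foldl (stepB row col sign) acc = some (0, v) := by
  induction l generalizing acc with
  | nil => simp [pyGetCell] at hget
  | cons a rest ih =>
    obtain ⟨r, c, w⟩ := a
    by_cases hk : r = row ∧ c = col
    · obtain ⟨rfl, rfl⟩ := hk
      have hv : w = v := by simpa [pyGetCell] using hget
      subst hv
      have hstep : stepB r c sign acc (r, c, w) = some (0, w) := by
        rcases hacc with rfl | ⟨p, rfl, hp⟩
        · rcases hstop with rfl | rfl <;> simp [stepB]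
        · rcases hstop with rfl | rfl <;> simp [stepB, hp]
      rw [List.foldl_cons, hstep]
      exact foldl_stepB_absorb rest r c sign w
    · rw [pyGetCell_cons_ne r c w rest row col hk] at hget
      rw [List.foldl_cons]
      refine ih _ hget ?_
      -- the updated accumulator still has positive distance (d = 0 would mean the key matched)
      rcases hacc with rfl | ⟨p, rfl, hp⟩ <;> simp only [stepB] <;> split
      · rename_i h
        simp only [Bool.and_eq_true, decide_eq_true_eq, beq_iff_eq] at h
        refine Or.inr ⟨_, rfl, ?_⟩
        have hc : c ≠ col := fun hcc => hk ⟨h.1.1.1, hcc⟩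
        have h0 := h.1.1.2
        rcases hs with rfl | rfl <;> omega
      · exact Or.inl rfl
      · rename_i h
        simp only [Bool.and_eq_true, decide_eq_true_eq, beq_iff_eq] at h
        refine Or.inr ⟨_, rfl, ?_⟩
        have hc : c ≠ col := fun hcc => hk ⟨h.1.1.1, hcc⟩
        have h0 := h.1.1.2
        rcases hs with rfl | rfl <;> omega
      · exact Or.inr ⟨p, rfl, hp⟩

theorem bestStop_hit (map : List (Int × Int × String)) (row col sign : Int) (v : String)
    (hs : sign = -1 ∨ sign = 1) (hstop : v = "." ∨ v = "#")
    (hget : pyGetCell map (row, col) = some v) :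
    bestStop map row col sign = some (0, v) :=
  foldl_stepB_hit map none row col sign v hs hstop hget (Or.inl rfl)

-- one element of the pass, seen from the current cell and from the next cell of the walk
theorem stepB_shift (row col sign : Int) (acc : Option (Int × String)) (e : Int × Int × String)
    (hs : sign = -1 ∨ sign = 1)
    (hsafe : e.1 = row → e.2.1 = col → ¬(e.2.2 = "." ∨ e.2.2 = "#")) :
    stepB row col sign (acc.map (fun b => (b.1 + 1, b.2))) e =
      (stepB row (col + sign) sign acc e).map (fun b => (b.1 + 1, b.2)) := by
  obtain ⟨r, c, w⟩ := e
  by_cases hrow : r = row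
  · by_cases hw : (w = "." ∨ w = "#")
    · -- a stop cell in the row: not at the current column, distances shift by one
      have hc : c ≠ col := fun hcc => hsafe hrow hcc hw
      have hd : ((c - col) * sign : Int) = (c - (col + sign)) * sign + 1 := by
        rcases hs with rfl | rfl <;> ring
      have hD : ((c - (col + sign)) * sign : Int) ≠ -1 := by
        rcases hs with rfl | rfl <;> omega
      have hd0 : (0 ≤ ((c - (col + sign)) * sign : Int) + 1) = (0 ≤ ((c - (col + sign)) * sign : Int)) := by
        apply propext; constructor <;> intro h <;> omega
      cases acc with
      | none =>
        simp only [stepB, Option.map_none, hd, hd0]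
        split <;> simp
      | some b =>
        obtain ⟨b1, bv⟩ := b
        have hlt : (((c - (col + sign)) * sign : Int) + 1 < b1 + 1) = (((c - (col + sign)) * sign : Int) < b1) := by
          apply propext; omega
        simp only [stepB, Option.map_some, hd, hd0, hlt]
        split <;> simp
    · -- not a stop value: filtered out on both sides
      have hwb : (w == "." || w == "#") = false := by
        obtain ⟨h1, h2⟩ := not_or.mp hw
        simp [h1, h2]
      simp [stepB, hwb]
  · have hb : (r == row) = false := by simp [hrow]
    simp [stepB, hb]

-- the scrutinised cell is not a stop: shifting one cell only shifts the distances
theorem foldl_stepB_shift (l : List (Int × Int × String)) (acc : Option (Int × String))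
    (row col sign : Int)
    (hs : sign = -1 ∨ sign = 1)
    (hskip : ∀ e ∈ l, e.1 = row → e.2.1 = col → ¬(e.2.2 = "." ∨ e.2.2 = "#")) :
    l.foldl (stepB row col sign) (acc.map (fun b => (b.1 + 1, b.2))) =
      (l.foldl (stepB row (col + sign) sign) acc).map (fun b => (b.1 + 1, b.2)) := by
  induction l generalizing acc with
  | nil => rfl
  | cons a rest ih =>
    rw [List.foldl_cons, List.foldl_cons,
      stepB_shift row col sign acc a hs (hskip a List.mem_cons_self)]
    exact ih _ (fun e he => hskip e (List.mem_cons_of_mem _ he))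

-- B's selection, read through one step of A's walk
theorem bestStop_shift (map : List (Int × Int × String)) (row col sign : Int)
    (hnd : (map.map (fun e => (e.1, e.2.1))).Nodup)
    (hs : sign = -1 ∨ sign = 1)
    (h1 : pyGetCell map (row, col) ≠ some ".")
    (h2 : pyGetCell map (row, col) ≠ some "#") :
    bestStop map row col sign = (bestStop map row (col + sign) sign).map (fun b => (b.1 + 1, b.2)) := by
  have hskip : ∀ e ∈ map, e.1 = row → e.2.1 = col → ¬(e.2.2 = "." ∨ e.2.2 = "#") := by
    intro e he hr hc hstop
    have hm := pyGetCell_of_mem map hnd e he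
    rw [hr, hc] at hm
    rcases hstop with hv | hv <;> rw [hv] at hm
    · exact h1 hm
    · exact h2 hm
  simpa using foldl_stepB_shift map none row col sign hs hskip

-- main induction: the fuelled walk equals B's one-pass selection

theorem goA_eq_alt (fuel : Nat) : ∀ (row col : Int) (map : List (Int × Int × String)) (dir : String),
    (map.map (fun e => (e.1, e.2.1))).Nodup →
    (∃ e ∈ map, e.1 = row ∧ (e.2.2 = "." ∨ e.2.2 = "#") ∧
      0 ≤ (e.2.1 - col) * (if dir = "<" then -1 else 1) ∧
      (e.2.1 - col) * (if dir = "<" then -1 else 1) < fuel) →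
    goA fuel (row, col) map dir =
      (match bestStop map row col (if dir = "<" then -1 else 1) with
       | some (_, v) => v == "."
       | none => false) := by
  induction fuel with
  | zero =>
    intro row col map dir _ ⟨e, _, _, _, hd0, hdf⟩
    exfalso; omega
  | succ f ih =>
    intro row col map dir hnd ⟨e, he, hr, hstop, hd0, hdf⟩
    have hs : (if dir = "<" then (-1 : Int) else 1) = -1 ∨ (if dir = "<" then (-1 : Int) else 1) = 1 := by
      by_cases h : dir = "<" <;> simp [h]
    by_cases hdot : pyGetCell map (row, col) = some "."
    · rw [bestStop_hit map row col _ "." hs (Or.inl rfl) hdot]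
      simp [goA, hdot]
    · by_cases hwall : pyGetCell map (row, col) = some "#"
      · rw [bestStop_hit map row col _ "#" hs (Or.inr rfl) hwall]
        simp [goA, hwall]
      · -- the walk advances; the stop cell is not at the current column
        have hne : e.2.1 ≠ col := by
          intro hcc
          have := pyGetCell_of_mem map hnd e he
          rw [hr, hcc] at this
          rcases hstop with hv | hv <;> rw [hv] at this
          · exact hdot this
          · exact hwall this
        have hrest : ∃ e ∈ map, e.1 = row ∧ (e.2.2 = "." ∨ e.2.2 = "#") ∧
            0 ≤ (e.2.1 - (col + (if dir = "<" then (-1 : Int) else 1))) * (if dir = "<" then -1 else 1) ∧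
            (e.2.1 - (col + (if dir = "<" then (-1 : Int) else 1))) * (if dir = "<" then -1 else 1) < f := by
          have hnz : e.2.1 - col ≠ 0 := sub_ne_zero.mpr hne
          refine ⟨e, he, hr, hstop, ?_, ?_⟩ <;>
            rcases hs with h | h <;> rw [h] at hd0 hdf ⊢ <;> push_cast at hdf ⊢ <;> omega
        rw [bestStop_shift map row col _ hnd hs hdot hwall]
        have hstepA : goA (f + 1) (row, col) map dir =
            goA f (row, col + (if dir = "<" then (-1 : Int) else 1)) map dir := by
          by_cases hd : dir = "<" <;> simp [goA, hdot, hwall, hd, sub_eq_add_neg]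
        rw [hstepA, ih row (col + (if dir = "<" then (-1 : Int) else 1)) map dir hnd hrest]
        cases bestStop map row (col + (if dir = "<" then (-1 : Int) else 1)) (if dir = "<" then (-1 : Int) else 1) with
        | none => rfl
        | some b => rfl

-- ===== VERDICT (by name: the statement is the Claim_ definition above) =====
theorem check_pt2_lateral_move_spec : Claim_equal_check_pt2_lateral_move := by
  intro loc map dir _ hpre
  obtain ⟨hnd, e, he, hr, hstop, hd0⟩ := hpre
  unfold Spec_check_pt2_lateral_move check_pt2_lateral_move check_pt2_lateral_move_alt
  have hle : (e.2.1 - loc.2).natAbs ≤ map.foldl (fun m e => max m (e.2.1 - loc.2).natAbs) 0 :=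
    (le_foldl_max map (fun e => (e.2.1 - loc.2).natAbs) 0).2 e he
  have hs : (if dir = "<" then (-1 : Int) else 1) = -1 ∨ (if dir = "<" then (-1 : Int) else 1) = 1 := by
    by_cases h : dir = "<" <;> simp [h]
  have hdf : (e.2.1 - loc.2) * (if dir = "<" then -1 else 1) < (fuelA loc map : Int) := by
    unfold fuelA
    rcases hs with h | h <;> rw [h] at hd0 ⊢ <;> push_cast <;> omega
  have := goA_eq_alt (fuelA loc map) loc.1 loc.2 map dir hnd ⟨e, he, hr, hstop, hd0, hdf⟩
  simpa using this
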